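-- pv_equiv track=rewrite | github.com/ssantan2/aoc2021 | 3/dat3.py | gen_new_lines
-- ===== SOURCE A (Python) =====
-- from collections import defaultdict
--
-- def gen_new_lines(lines, index, reverse=False,):
--     tmp = defaultdict(list)
--     one_count = 0
--     zero_count = 0
--     for line in lines:
--         l_ent = line[index]
--         tmp[l_ent].append(line)
--         if l_ent == "1":
--             one_count += 1
--         else:
--             zero_count += 1
--
--     if one_count == zero_count:
--         if reverse:
--             new_lines = tmp["0"]
--         else:
--             new_lines = tmp["1"]
--     elif one_count > zero_count:
--         if reverse:
--             new_lines = tmp["0"]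
--         else:
--             new_lines = tmp["1"]
--
--     elif zero_count > one_count:
--         if reverse:
--             new_lines = tmp["1"]
--         else:
--             new_lines = tmp["0"]
--
--     return new_lines
-- ===== SOURCE B (Python) =====
-- def gen_new_lines(lines, index, reverse=False):
--     ones = sum(1 for l in lines if l[index] == "1")
--     zeros = len(lines) - ones
--     keep = "1" if (ones >= zeros) != reverse else "0"
--     return [l for l in lines if l[index] == keep]
-- ===== Notes on version B (the rewrite author's own statement) =====
-- stated objective: simpler
-- what changed: Replaces the defaultdict bucket-partition plus three redundant branch pairs with a single ones-counter, one boolean comparison that picks the keep character, and a direct filtering pass.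
import Mathlib
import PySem

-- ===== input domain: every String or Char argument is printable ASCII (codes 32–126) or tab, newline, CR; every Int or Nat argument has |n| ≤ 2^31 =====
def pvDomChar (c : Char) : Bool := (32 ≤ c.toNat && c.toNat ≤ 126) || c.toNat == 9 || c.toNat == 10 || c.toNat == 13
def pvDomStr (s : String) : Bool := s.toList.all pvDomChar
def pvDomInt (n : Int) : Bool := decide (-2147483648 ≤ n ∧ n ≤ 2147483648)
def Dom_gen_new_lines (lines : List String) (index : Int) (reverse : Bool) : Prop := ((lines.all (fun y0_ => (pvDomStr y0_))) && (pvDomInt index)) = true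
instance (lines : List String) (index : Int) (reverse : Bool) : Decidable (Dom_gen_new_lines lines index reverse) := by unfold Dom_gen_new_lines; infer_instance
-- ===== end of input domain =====

-- B replaces A's defaultdict partition and three redundant branch pairs by a ones-counter,
-- one boolean comparison choosing the keep character, and a direct filtering pass (objective: simpler).

-- ===== PORT A =====
-- line[index] (a one-char string) is ported as the Option Char 'PySem.Str.pyGet? line index'
-- (exact under Pre_, where it is 'some _'); the defaultdict is a PySem.Dict keyed by that option.
def gen_new_lines (lines : List String) (index : Int) (reverse : Bool) : List String :=
  let st := lines.foldl
    (fun (s : PySem.Dict (Option Char) (List String) × Int × Int) line =>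
      let l_ent := PySem.Str.pyGet? line index
      let tmp := s.1.modify l_ent [] (fun v => v ++ [line])
      if l_ent == some '1' then (tmp, s.2.1 + 1, s.2.2) else (tmp, s.2.1, s.2.2 + 1))
    (PySem.Dict.empty, 0, 0)
  if st.2.1 == st.2.2 then
    (if reverse then st.1.getD (some '0') [] else st.1.getD (some '1') [])
  else if st.2.1 > st.2.2 then
    (if reverse then st.1.getD (some '0') [] else st.1.getD (some '1') [])
  else
    (if reverse then st.1.getD (some '1') [] else st.1.getD (some '0') [])

-- ===== PORT B =====
def gen_new_lines_alt (lines : List String) (index : Int) (reverse : Bool) : List String :=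
  let ones := lines.foldl (fun a l => if PySem.Str.pyGet? l index == some '1' then a + 1 else a) (0 : Int)
  let zeros := (lines.length : Int) - ones
  let keep := if (decide (ones ≥ zeros)) != reverse then '1' else '0'
  lines.filter (fun l => PySem.Str.pyGet? l index == some keep)

-- ===== PRECONDITION & SPEC =====
-- Pre_: Python A raises IndexError when some line[index] is out of range; excluded exactly.
def Pre_gen_new_lines (lines : List String) (index : Int) (reverse : Bool) : Prop :=
  ∀ l ∈ lines, PySem.Raise.InRange l.toList.length index
instance (lines : List String) (index : Int) (reverse : Bool) : Decidable (Pre_gen_new_lines lines index reverse) := by unfold Pre_gen_new_lines; infer_instance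

def pvWitness_gen_new_lines : List String × Int × Bool := (["10", "01", "11"], 0, false)

def Spec_gen_new_lines (lines : List String) (index : Int) (reverse : Bool) (out : List String) : Prop := out = gen_new_lines_alt lines index reverse
instance (lines : List String) (index : Int) (reverse : Bool) (out : List String) : Decidable (Spec_gen_new_lines lines index reverse out) := by unfold Spec_gen_new_lines; infer_instance

-- ===== CLAIM (what is proved, stated in full; the proofs are below) =====
def Claim_equal_gen_new_lines : Prop := ∀ (lines : List String) (index : Int) (reverse : Bool), Dom_gen_new_lines lines index reverse → Pre_gen_new_lines lines index reverse → Spec_gen_new_lines lines index reverse (gen_new_lines lines index reverse)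

-- ===== LEMMAS AND PROOFS =====

-- A's loop, split into its three components (dict of buckets, ones counter, zeros counter).
theorem foldA_split (index : Int) (lines : List String)
    (d : PySem.Dict (Option Char) (List String)) (oc zc : Int) :
    lines.foldl
      (fun (s : PySem.Dict (Option Char) (List String) × Int × Int) line =>
        let l_ent := PySem.Str.pyGet? line index
        let tmp := s.1.modify l_ent [] (fun v => v ++ [line])
        if l_ent == some '1' then (tmp, s.2.1 + 1, s.2.2) else (tmp, s.2.1, s.2.2 + 1))
      (d, oc, zc) =
    (lines.foldl (fun d l => d.modify (PySem.Str.pyGet? l index) [] (fun v => v ++ [l])) d,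
     oc + (lines.countP (fun l => PySem.Str.pyGet? l index == some '1') : Int),
     zc + (lines.countP (fun l => !(PySem.Str.pyGet? l index == some '1')) : Int)) := by
  induction lines generalizing d oc zc with
  | nil => simp
  | cons x xs ih =>
    rw [List.foldl_cons, List.countP_cons, List.countP_cons]
    by_cases h : (PySem.Str.pyGet? x index == some '1') = true
    · simp only [h, Bool.not_true, if_true, if_false, Bool.false_eq_true]
      rw [ih]
      refine Prod.ext rfl (Prod.ext ?_ ?_) <;> push_cast <;> ring
    · simp only [Bool.not_eq_true] at h
      simp only [h, Bool.not_false, if_true, if_false, Bool.false_eq_true]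
      rw [ih]
      refine Prod.ext rfl (Prod.ext ?_ ?_) <;> push_cast <;> ring

-- The dict's bucket at c is exactly the filter of lines by key c.
theorem bucket_eq (index : Int) (lines : List String) (c : Option Char) :
    (lines.foldl (fun d l => d.modify (PySem.Str.pyGet? l index) [] (fun v => v ++ [l]))
        (PySem.Dict.empty : PySem.Dict (Option Char) (List String))).getD c [] =
      lines.filter (fun l => PySem.Str.pyGet? l index == c) := by
  have h := PySem.Dict.getD_foldl_modify_append
    (l := lines.map (fun l => (PySem.Str.pyGet? l index, l)))
    (d := (PySem.Dict.empty : PySem.Dict (Option Char) (List String))) (c := c)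
  rw [List.foldl_map] at h
  simpa [List.filter_map, Function.comp_def, List.map_map] using h

theorem gen_new_lines_spec : Claim_equal_gen_new_lines := by
  intro lines index reverse _ _
  unfold Spec_gen_new_lines gen_new_lines gen_new_lines_alt
  simp only [foldA_split, bucket_eq, PySem.List.foldl_count_if]
  have hlen : lines.countP (fun l => PySem.Str.pyGet? l index == some '1')
      + lines.countP (fun l => !(PySem.Str.pyGet? l index == some '1')) = lines.length := by
    have h := (List.length_eq_countP_add_countP
      (p := fun l => PySem.Str.pyGet? l index == some '1') (l := lines)).symm
    have hc : lines.countP (fun a => decide (¬((PySem.List.pyGet? a.toList index == some '1') = true)))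
        = lines.countP (fun l => !(PySem.List.pyGet? l.toList index == some '1')) :=
      List.countP_congr (fun a _ => by
        by_cases hx : (PySem.List.pyGet? a.toList index == some '1') = true <;> simp [hx])
    simp only [PySem.Str.pyGet?_eq, PySem.Chars.pyGet?_eq_listPyGet?] at h ⊢
    rw [← hc]
    exact h
  set c1 := lines.countP (fun l => PySem.Str.pyGet? l index == some '1') with hc1
  set c0 := lines.countP (fun l => !(PySem.Str.pyGet? l index == some '1')) with hc0
  split_ifs with h1 h2 h3 h4 h5 <;> simp_all <;> omega
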